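-- pv_equiv track=rewrite | github.com/sudoMakeIT/BioInformatics | t6/dotplots.py | extended_dotplot
-- ===== SOURCE A (Python) =====
-- def create_mat(nrows, ncols):
--     mat = []
--     for i in range(nrows):
--         mat.append([])
--         for j in range(ncols):
--             mat[i].append(0)
--     return mat
--
-- def extended_dotplot (seq1, seq2, window, stringency):
--     mat = create_mat(len(seq1), len(seq2))
--     start = int(window/2)
--     for i in range(start,len(seq1)-start):
--         for j in range(start, len(seq2)-start):
--             matches = 0
--             l = j - start
--             for k in range(i-start, i+start+1):
--                 if seq1[k] == seq2[l]: matches += 1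
--                 l += 1
--                 if matches >= stringency: mat[i][j] = 1
--     return mat
-- ===== SOURCE B (Python) =====
-- def extended_dotplot(seq1, seq2, window, stringency):
--     n, m = len(seq1), len(seq2)
--     start = int(window / 2)
--     if start < 0:
--         return [[0] * m for _ in range(n)]
--     # prefix-sum of matches along each diagonal d = j - i
--     P = []
--     for d in range(-(n - 1), m):
--         i0 = 0 if d >= 0 else -d
--         j0 = i0 + d
--         L = min(n - i0, m - j0)
--         pref = [0]
--         run = 0
--         for t in range(L):
--             run += 1 if seq1[i0 + t] == seq2[j0 + t] else 0
--             pref.append(run)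
--         P.append(pref)
--
--     def cell(i, j):
--         if i < start or i >= n - start or j < start or j >= m - start:
--             return 0
--         d = j - i
--         i0 = 0 if d >= 0 else -d
--         t = i - i0
--         pref = P[d + n - 1]
--         return 1 if pref[t + start + 1] - pref[t - start] >= stringency else 0
--
--     return [[cell(i, j) for j in range(m)] for i in range(n)]
-- ===== Notes on version B (the rewrite author's own statement) =====
-- stated objective: faster
-- what changed: A rescans the whole window for every cell (three nested loops, setting mat[i][j] inside the scan); B makes one prefix-sum pass of match counts along each diagonal d = j - i and then decides every cell with two O(1) prefix lookups, building the rows as comprehensions instead of mutating a zero matrix.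
import Mathlib
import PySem

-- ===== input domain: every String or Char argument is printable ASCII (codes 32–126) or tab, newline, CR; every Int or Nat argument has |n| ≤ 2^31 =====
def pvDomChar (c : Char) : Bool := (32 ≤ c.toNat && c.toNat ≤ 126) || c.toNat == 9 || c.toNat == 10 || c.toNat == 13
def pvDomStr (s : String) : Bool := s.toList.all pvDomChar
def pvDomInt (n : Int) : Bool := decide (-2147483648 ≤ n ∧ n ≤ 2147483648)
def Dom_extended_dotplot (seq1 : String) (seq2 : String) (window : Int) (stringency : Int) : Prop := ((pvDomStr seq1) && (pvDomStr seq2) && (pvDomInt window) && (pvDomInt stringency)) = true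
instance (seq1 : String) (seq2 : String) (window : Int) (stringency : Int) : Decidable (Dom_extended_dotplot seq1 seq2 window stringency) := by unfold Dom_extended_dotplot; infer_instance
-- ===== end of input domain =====

-- B computes the same dotplot matrix with one prefix-sum pass per diagonal and O(1) lookups per
-- cell instead of A's per-cell window rescan (objective: faster).

-- ===== PORT A =====
-- literal port of create_mat (mat[i].append(0) = set row i to row i ++ [0])
def create_mat (nrows ncols : Int) : List (List Int) :=
  (PySem.List.pyRange 0 nrows 1).foldl (fun mat i =>
    let mat := mat ++ [[]]
    (PySem.List.pyRange 0 ncols 1).foldl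
      (fun mat _j => PySem.List.pySetD mat i ((PySem.List.pyGetD mat i []) ++ [0])) mat) []

-- literal port of A; int(window/2) is PySem.Int.truncdiv (exact here: |window| ≤ 2^31 < 2^53 on Dom)
def extended_dotplot (seq1 : String) (seq2 : String) (window : Int) (stringency : Int) : List (List Int) :=
  let mat := create_mat (PySem.Str.len seq1) (PySem.Str.len seq2)
  let start := PySem.Int.truncdiv window 2
  (PySem.List.pyRange start (PySem.Str.len seq1 - start) 1).foldl (fun mat i =>
    (PySem.List.pyRange start (PySem.Str.len seq2 - start) 1).foldl (fun mat j =>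
      ((PySem.List.pyRange (i - start) (i + start + 1) 1).foldl
        (fun (st : Int × Int × List (List Int)) k =>
          let mtc := if PySem.Str.pyGet? seq1 k == PySem.Str.pyGet? seq2 st.2.1 then st.1 + 1 else st.1
          let l := st.2.1 + 1
          let mat := if mtc ≥ stringency then
              PySem.List.pySetD st.2.2 i (PySem.List.pySetD (PySem.List.pyGetD st.2.2 i []) j 1)
            else st.2.2
          (mtc, l, mat))
        ((0 : Int), j - start, mat)).2.2) mat) mat

-- ===== PORT B =====
-- literal port of Source B: prefix sums of matches along every diagonal d = j - i, then O(1) per cell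
def extended_dotplot_alt (seq1 : String) (seq2 : String) (window : Int) (stringency : Int) : List (List Int) :=
  let n := PySem.Str.len seq1
  let m := PySem.Str.len seq2
  let start := PySem.Int.truncdiv window 2
  if start < 0 then
    (PySem.List.pyRange 0 n 1).map (fun _ => (PySem.List.pyRange 0 m 1).map (fun _ => (0 : Int)))
  else
    let P := (PySem.List.pyRange (-(n - 1)) m 1).foldl (fun P d =>
      let i0 : Int := if d ≥ 0 then 0 else -d
      let j0 := i0 + d
      let L := min (n - i0) (m - j0)
      let pr := (PySem.List.pyRange 0 L 1).foldl
        (fun (st : Int × List Int) t =>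
          let run := st.1 + (if PySem.Str.pyGet? seq1 (i0 + t) == PySem.Str.pyGet? seq2 (j0 + t) then (1:Int) else 0)
          (run, st.2 ++ [run])) ((0 : Int), [(0 : Int)])
      P ++ [pr.2]) []
    let cell := fun (i j : Int) =>
      if i < start ∨ i ≥ n - start ∨ j < start ∨ j ≥ m - start then (0 : Int)
      else
        let d := j - i
        let i0 : Int := if d ≥ 0 then 0 else -d
        let t := i - i0
        let pref := PySem.List.pyGetD P (d + n - 1) []
        if PySem.List.pyGetD pref (t + start + 1) 0 - PySem.List.pyGetD pref (t - start) 0 ≥ stringency then 1 else 0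
    (PySem.List.pyRange 0 n 1).map (fun i => (PySem.List.pyRange 0 m 1).map (fun j => cell i j))

-- ===== PRECONDITION & SPEC =====
def Spec_extended_dotplot (seq1 : String) (seq2 : String) (window : Int) (stringency : Int) (out : List (List Int)) : Prop := out = extended_dotplot_alt seq1 seq2 window stringency
instance (seq1 : String) (seq2 : String) (window : Int) (stringency : Int) (out : List (List Int)) : Decidable (Spec_extended_dotplot seq1 seq2 window stringency out) := by unfold Spec_extended_dotplot; infer_instance

-- ===== CLAIM (what is proved, stated in full; the proofs are below) =====
def Claim_equal_extended_dotplot : Prop := ∀ (seq1 : String) (seq2 : String) (window : Int) (stringency : Int), Dom_extended_dotplot seq1 seq2 window stringency → Spec_extended_dotplot seq1 seq2 window stringency (extended_dotplot seq1 seq2 window stringency)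

-- ===== LEMMAS AND PROOFS =====

def mEq (s1 s2 : String) (a b : Int) : Bool :=
  PySem.Str.pyGet? s1 a == PySem.Str.pyGet? s2 b
def dSum (s1 s2 : String) (d a b : Int) : Int :=
  ((PySem.List.pyRange a b 1).map (fun t => if mEq s1 s2 t (t + d) then (1:Int) else 0)).sum
def Spair (s1 s2 : String) : List Int → Int → Int
  | [], _ => 0
  | k :: ks, l => (if mEq s1 s2 k l then (1:Int) else 0) + Spair s1 s2 ks (l + 1)

lemma dSum_empty (s1 s2 : String) (d a b : Int) (h : b ≤ a) : dSum s1 s2 d a b = 0 := by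
  unfold dSum
  rw [PySem.List.pyRange_one_eq_nil h]
  simp

lemma dSum_succ_right (s1 s2 : String) (d a b : Int) (h : a ≤ b) :
    dSum s1 s2 d a (b + 1) = dSum s1 s2 d a b + (if mEq s1 s2 b (b + d) then (1:Int) else 0) := by
  unfold dSum
  rw [PySem.List.pyRange_one_succ_right h]
  simp

lemma dSum_split (s1 s2 : String) (d a b c : Int) (h1 : a ≤ b) (h2 : b ≤ c) :
    dSum s1 s2 d a c = dSum s1 s2 d a b + dSum s1 s2 d b c := by
  unfold dSum
  rw [PySem.List.pyRange_one_append a b c h1 h2]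
  simp

lemma Spair_nonneg (s1 s2 : String) (ks : List Int) (l : Int) : 0 ≤ Spair s1 s2 ks l := by
  induction ks generalizing l with
  | nil => simp [Spair]
  | cons k ks ih =>
    have := ih (l + 1)
    simp only [Spair]
    split <;> omega

lemma Spair_pyRange (s1 s2 : String) (c : Nat) : ∀ (a l : Int),
    Spair s1 s2 (PySem.List.pyRange a (a + c) 1) l = dSum s1 s2 (l - a) a (a + c) := by
  induction c with
  | zero => intro a l; simp [PySem.List.pyRange_one_eq_nil, Spair, dSum_empty]
  | succ c ih =>
    intro a l
    rw [PySem.List.pyRange_one_cons (by omega)]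
    simp only [Spair]
    have : a + (c + 1 : Nat) = (a + 1) + (c : Nat) := by push_cast; ring
    rw [this, ih (a + 1) (l + 1)]
    have hs : dSum s1 s2 (l - a) a ((a+1) + (c:Nat)) = dSum s1 s2 (l - a) a (a+1) + dSum s1 s2 (l - a) (a+1) ((a+1)+(c:Nat)) := by
      apply dSum_split <;> omega
    rw [hs]
    have h1 : dSum s1 s2 (l - a) a (a + 1) = (if mEq s1 s2 a l then (1:Int) else 0) := by
      have := dSum_succ_right s1 s2 (l - a) a a le_rfl
      rw [dSum_empty s1 s2 _ a a le_rfl] at this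
      rw [this]
      have hx : a + (l - a) = l := by ring
      rw [hx]; ring
    have h2 : (l + 1) - (a + 1) = l - a := by ring
    rw [h1, h2]

lemma pyGetD_map_pyRange_mem {α : Type} (g : Int → α) (a b x : Int) (dflt : α)
    (h1 : a ≤ x) (h2 : x < b) :
    PySem.List.pyGetD ((PySem.List.pyRange a b 1).map g) (x - a) dflt = g x := by
  rw [PySem.List.pyRange_one]
  rw [List.map_map]
  rw [PySem.List.pyGetD_of_nonneg _ dflt (show (0:Int) ≤ x - a by omega)]
  rw [List.getD_eq_getElem?_getD]
  rw [List.getElem?_map]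
  rw [List.getElem?_range (by omega)]
  simp only [Option.map_some, Option.getD_some, Function.comp_apply]
  congr 1
  omega

def Shp (N M : Nat) (Mt : List (List Int)) : Prop :=
  Mt.length = N ∧ ∀ r ∈ Mt, r.length = M
def ent (Mt : List (List Int)) (a b : Nat) : Int := (Mt.getD a []).getD b 0
def setCell (Mt : List (List Int)) (i j : Int) : List (List Int) :=
  PySem.List.pySetD Mt i (PySem.List.pySetD (PySem.List.pyGetD Mt i []) j 1)

lemma setCell_eq {Mt : List (List Int)} {i j : Int}
    (hi0 : 0 ≤ i) (hiN : i < (Mt.length : Int)) (hj0 : 0 ≤ j) :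
    setCell Mt i j = Mt.set i.toNat ((Mt[i.toNat]'(by omega)).set j.toNat 1) := by
  unfold setCell
  rw [PySem.List.pySetD_of_nonneg _ _ hj0, PySem.List.pySetD_of_nonneg _ _ hi0,
      PySem.List.pyGetD_eq_getElem _ _ hi0 hiN]

lemma length_setCell (Mt : List (List Int)) (i j : Int) :
    (setCell Mt i j).length = Mt.length := by
  unfold setCell
  rw [PySem.List.length_pySetD]

lemma Shp_setCell {N M : Nat} {Mt : List (List Int)} (h : Shp N M Mt) {i j : Int}
    (hi0 : 0 ≤ i) (hiN : i < (N:Int)) (hj0 : 0 ≤ j) :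
    Shp N M (setCell Mt i j) := by
  obtain ⟨hlen, hrows⟩ := h
  have hit : i.toNat < Mt.length := by omega
  rw [setCell_eq hi0 (by omega) hj0]
  refine ⟨by simp [hlen], ?_⟩
  intro r hr
  rcases List.mem_or_eq_of_mem_set hr with h | rfl
  · exact hrows r h
  · rw [List.length_set]
    exact hrows _ (List.getElem_mem hit)

lemma ent_setCell {N M : Nat} {Mt : List (List Int)} (h : Shp N M Mt) {i j : Int}
    (hi0 : 0 ≤ i) (hiN : i < (N:Int)) (hj0 : 0 ≤ j)
    (a b : Nat) (ha : a < N) (hb : b < M) :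
    ent (setCell Mt i j) a b = if (a:Int) = i ∧ (b:Int) = j then 1 else ent Mt a b := by
  obtain ⟨hlen, hrows⟩ := h
  have hit : i.toNat < Mt.length := by omega
  have hrowlen : (Mt[i.toNat]'hit).length = M := hrows _ (List.getElem_mem hit)
  rw [setCell_eq hi0 (by omega) hj0]
  unfold ent
  have h1 : (Mt.set i.toNat ((Mt[i.toNat]'hit).set j.toNat 1)).getD a [] =
      (Mt.set i.toNat ((Mt[i.toNat]'hit).set j.toNat 1))[a]'(by simp; omega) :=
    List.getD_eq_getElem _ _ (by simp; omega)
  rw [h1, List.getElem_set]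
  by_cases hai : i.toNat = a
  · simp only [if_pos hai]
    have h2 : ((Mt[i.toNat]'hit).set j.toNat 1).getD b 0 =
        ((Mt[i.toNat]'hit).set j.toNat 1)[b]'(by simp; omega) :=
      List.getD_eq_getElem _ _ (by simp; omega)
    rw [h2, List.getElem_set]
    by_cases hbj : j.toNat = b
    · have hc : (a:Int) = i ∧ (b:Int) = j := by omega
      simp [hbj, hc]
    · have hc : ¬((a:Int) = i ∧ (b:Int) = j) := by omega
      rw [if_neg hbj, if_neg hc]
      subst hai
      have e1 : Mt.getD i.toNat [] = Mt[i.toNat]'hit := List.getD_eq_getElem _ _ hit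
      rw [e1, List.getD_eq_getElem (Mt[i.toNat]'hit) 0 (by omega)]
  · have hc : ¬((a:Int) = i ∧ (b:Int) = j) := by omega
    rw [if_neg hai, if_neg hc]
    have haN : a < Mt.length := by omega
    have e1 : Mt.getD a [] = Mt[a]'haN := List.getD_eq_getElem _ _ haN
    rw [e1]

lemma setCell_setCell {Mt : List (List Int)} {i j : Int}
    (hi0 : 0 ≤ i) (hiN : i < (Mt.length : Int)) (hj0 : 0 ≤ j) :
    setCell (setCell Mt i j) i j = setCell Mt i j := by
  have hit : i.toNat < Mt.length := by omega
  rw [setCell_eq hi0 hiN hj0]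
  rw [setCell_eq hi0 (by simp; omega) hj0]
  rw [List.getElem_set_self (by simp [hit]), List.set_set, List.set_set]

lemma kfold (seq1 seq2 : String) (str i j : Int) (ks : List Int) :
    ∀ (c l : Int) (Mt : List (List Int)), 0 ≤ c → 0 ≤ i → i < (Mt.length:Int) → 0 ≤ j →
    (ks.foldl (fun (st : Int × Int × List (List Int)) k =>
        (if PySem.Str.pyGet? seq1 k == PySem.Str.pyGet? seq2 st.2.1 then st.1 + 1 else st.1,
         st.2.1 + 1,
         if (if PySem.Str.pyGet? seq1 k == PySem.Str.pyGet? seq2 st.2.1 then st.1 + 1 else st.1) ≥ str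
         then PySem.List.pySetD st.2.2 i (PySem.List.pySetD (PySem.List.pyGetD st.2.2 i []) j 1)
         else st.2.2)) (c, l, Mt))
    = (c + Spair seq1 seq2 ks l, l + ks.length,
       if ks ≠ [] ∧ str ≤ c + Spair seq1 seq2 ks l then setCell Mt i j else Mt) := by
  induction ks with
  | nil => intro c l Mt hc hi0 hiN hj0; simp [Spair]
  | cons k ks ih =>
    intro c l Mt hc hi0 hiN hj0
    simp only [List.foldl_cons]
    have hS : 0 ≤ Spair seq1 seq2 ks (l + 1) := Spair_nonneg _ _ _ _
    set δ : Int := if mEq seq1 seq2 k l then 1 else 0 with hδ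
    have hδ0 : 0 ≤ δ := by rw [hδ]; split <;> norm_num
    have hinit : ((if PySem.Str.pyGet? seq1 k == PySem.Str.pyGet? seq2 l then c + 1 else c,
         l + 1,
         if (if PySem.Str.pyGet? seq1 k == PySem.Str.pyGet? seq2 l then c + 1 else c) ≥ str
         then PySem.List.pySetD Mt i (PySem.List.pySetD (PySem.List.pyGetD Mt i []) j 1)
         else Mt) : Int × Int × List (List Int))
        = (c + δ, l + 1, if str ≤ c + δ then setCell Mt i j else Mt) := by
      rw [hδ]; unfold mEq setCell
      by_cases hm : (PySem.Str.pyGet? seq1 k == PySem.Str.pyGet? seq2 l) = true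
      · simp only [if_pos hm, ge_iff_le]
      · simp only [if_neg hm, ge_iff_le]
        norm_num
    rw [hinit,
        ih (c + δ) (l + 1) _ (by omega) hi0 (by split <;> first | (rw [length_setCell]; omega) | omega) hj0]
    have htot : c + δ + Spair seq1 seq2 ks (l + 1) = c + Spair seq1 seq2 (k :: ks) l := by
      simp only [Spair, hδ]; ring
    refine Prod.ext htot (Prod.ext (by rw [List.length_cons]; push_cast; ring) ?_)
    simp only []
    by_cases hfin : str ≤ c + Spair seq1 seq2 (k :: ks) l
    · rw [if_pos (show (k :: ks) ≠ [] ∧ str ≤ c + Spair seq1 seq2 (k :: ks) l from ⟨by simp, hfin⟩)]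
      rcases eq_or_ne ks [] with rfl | hks
      · rw [if_neg (by simp)]
        rw [← htot] at hfin
        simp only [Spair, add_zero] at hfin
        rw [if_pos hfin]
      · rw [if_pos (show ks ≠ [] ∧ str ≤ c + δ + Spair seq1 seq2 ks (l + 1) from ⟨hks, by omega⟩)]
        by_cases h1 : str ≤ c + δ
        · rw [if_pos h1]
          exact setCell_setCell hi0 hiN hj0
        · rw [if_neg h1]
    · have h1 : ¬ str ≤ c + δ := by omega
      rw [if_neg (fun (h : ks ≠ [] ∧ str ≤ c + δ + Spair seq1 seq2 ks (l + 1)) => hfin (htot ▸ h.2))]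
      rw [if_neg h1]
      rw [if_neg (fun (h : (k :: ks) ≠ [] ∧ str ≤ c + Spair seq1 seq2 (k :: ks) l) => hfin h.2)]

-- proof-side name for A's j-loop body
def stepJA (seq1 seq2 : String) (str st i : Int) : List (List Int) → Int → List (List Int) :=
  fun mat j =>
    (List.foldl (fun (s : Int × Int × List (List Int)) k =>
        (if PySem.Str.pyGet? seq1 k == PySem.Str.pyGet? seq2 s.2.1 then s.1 + 1 else s.1,
         s.2.1 + 1,
         if (if PySem.Str.pyGet? seq1 k == PySem.Str.pyGet? seq2 s.2.1 then s.1 + 1 else s.1) ≥ str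
         then PySem.List.pySetD s.2.2 i (PySem.List.pySetD (PySem.List.pyGetD s.2.2 i []) j 1)
         else s.2.2))
      (0, j - st, mat) (PySem.List.pyRange (i - st) (i + st + 1) 1)).2.2

lemma stepJA_eq (seq1 seq2 : String) (str st i : Int) (hst : 0 ≤ st)
    (mat : List (List Int)) (j : Int) (hiN : i < (mat.length:Int)) (hi0 : 0 ≤ i) (hj0 : 0 ≤ j) :
    stepJA seq1 seq2 str st i mat j =
      if str ≤ dSum seq1 seq2 (j - i) (i - st) (i + st + 1) then setCell mat i j else mat := by
  unfold stepJA
  rw [kfold seq1 seq2 str i j _ 0 (j - st) mat le_rfl hi0 hiN hj0]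
  have hne : PySem.List.pyRange (i - st) (i + st + 1) 1 ≠ [] := by
    rw [PySem.List.pyRange_one_cons (by omega)]
    exact List.cons_ne_nil _ _
  have hSp : Spair seq1 seq2 (PySem.List.pyRange (i - st) (i + st + 1) 1) (j - st)
      = dSum seq1 seq2 (j - i) (i - st) (i + st + 1) := by
    rw [show i + st + 1 = (i - st) + (((2*st+1).toNat : Int)) from by omega]
    rw [Spair_pyRange seq1 seq2 (2*st+1).toNat (i - st) (j - st)]
    rw [show j - st - (i - st) = j - i from by ring]
  simp only [hSp, zero_add]
  rw [if_congr (and_iff_right hne) rfl rfl]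

lemma jfold (seq1 seq2 : String) (str st : Int) (N M : Nat) (i : Int)
    (hst : 0 ≤ st) (hi1 : st ≤ i) (hi2 : i < (N:Int) - st) :
    ∀ (js : List Int) (Mt : List (List Int)), Shp N M Mt →
    (∀ x ∈ js, st ≤ x ∧ x < (M:Int) - st) →
    Shp N M (js.foldl (stepJA seq1 seq2 str st i) Mt) ∧
    ∀ (a b : Nat), a < N → b < M →
      ent (js.foldl (stepJA seq1 seq2 str st i) Mt) a b
      = if ((a:Int) = i ∧ ((b:Int) ∈ js) ∧ str ≤ dSum seq1 seq2 ((b:Int) - i) (i - st) (i + st + 1))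
        then 1 else ent Mt a b := by
  intro js
  induction js with
  | nil =>
    intro Mt hShp _
    refine ⟨hShp, fun a b ha hb => ?_⟩
    rw [if_neg (by simp)]
    rfl
  | cons j js ih =>
    intro Mt hShp hjs
    obtain ⟨hj1, hj2⟩ := hjs j (List.mem_cons_self)
    have hj0 : 0 ≤ j := by omega
    have hi0 : 0 ≤ i := by omega
    have hstep : stepJA seq1 seq2 str st i Mt j =
        if str ≤ dSum seq1 seq2 (j - i) (i - st) (i + st + 1) then setCell Mt i j else Mt :=
      stepJA_eq seq1 seq2 str st i hst Mt j (by rw [hShp.1]; omega) hi0 hj0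
    have hShp1 : Shp N M (stepJA seq1 seq2 str st i Mt j) := by
      rw [hstep]; split
      · exact Shp_setCell hShp hi0 (by omega) hj0
      · exact hShp
    have hent1 : ∀ (a b : Nat), a < N → b < M →
        ent (stepJA seq1 seq2 str st i Mt j) a b
        = if ((a:Int) = i ∧ (b:Int) = j ∧ str ≤ dSum seq1 seq2 ((b:Int) - i) (i - st) (i + st + 1))
          then 1 else ent Mt a b := by
      intro a b ha hb
      rw [hstep]
      by_cases hd : str ≤ dSum seq1 seq2 (j - i) (i - st) (i + st + 1)
      · rw [if_pos hd, ent_setCell hShp hi0 (by omega) hj0 a b ha hb]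
        by_cases hab : (a:Int) = i ∧ (b:Int) = j
        · rw [if_pos hab, if_pos ⟨hab.1, hab.2, by rw [hab.2]; exact hd⟩]
        · rw [if_neg hab, if_neg (fun h => hab ⟨h.1, h.2.1⟩)]
      · rw [if_neg hd]
        rw [if_neg (fun h => hd (by rw [← h.2.1]; exact h.2.2))]
    rw [List.foldl_cons]
    obtain ⟨hShpR, hentR⟩ := ih (stepJA seq1 seq2 str st i Mt j) hShp1
      (fun x hx => hjs x (List.mem_cons_of_mem _ hx))
    refine ⟨hShpR, fun a b ha hb => ?_⟩
    rw [hentR a b ha hb, hent1 a b ha hb]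
    by_cases h1 : (a:Int) = i
    · by_cases h4 : str ≤ dSum seq1 seq2 ((b:Int) - i) (i - st) (i + st + 1)
      · by_cases h2 : (b:Int) = j
        · by_cases h3 : (b:Int) ∈ js
          · rw [if_pos ⟨h1, h3, h4⟩, if_pos ⟨h1, by simp [h2], h4⟩]
          · rw [if_neg (fun h => h3 h.2.1), if_pos ⟨h1, h2, h4⟩, if_pos ⟨h1, by simp [h2], h4⟩]
        · by_cases h3 : (b:Int) ∈ js
          · rw [if_pos ⟨h1, h3, h4⟩, if_pos ⟨h1, by simp [h3], h4⟩]
          · rw [if_neg (fun h => h3 h.2.1), if_neg (fun h => h2 h.2.1),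
                if_neg (fun h => (List.mem_cons.mp h.2.1).elim h2 h3)]
      · rw [if_neg (fun h => h4 h.2.2), if_neg (fun h => h4 h.2.2), if_neg (fun h => h4 h.2.2)]
    · rw [if_neg (fun h => h1 h.1), if_neg (fun h => h1 h.1), if_neg (fun h => h1 h.1)]

lemma ifold (seq1 seq2 : String) (str st : Int) (N M : Nat) (hst : 0 ≤ st) :
    ∀ (is : List Int) (Mt : List (List Int)), Shp N M Mt →
    (∀ x ∈ is, st ≤ x ∧ x < (N:Int) - st) →
    Shp N M (is.foldl (fun mat i =>
      (PySem.List.pyRange st ((M:Int) - st) 1).foldl (stepJA seq1 seq2 str st i) mat) Mt) ∧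
    ∀ (a b : Nat), a < N → b < M →
      ent (is.foldl (fun mat i =>
        (PySem.List.pyRange st ((M:Int) - st) 1).foldl (stepJA seq1 seq2 str st i) mat) Mt) a b
      = if ((a:Int) ∈ is ∧ st ≤ (b:Int) ∧ (b:Int) < (M:Int) - st ∧
            str ≤ dSum seq1 seq2 ((b:Int) - (a:Int)) ((a:Int) - st) ((a:Int) + st + 1))
        then 1 else ent Mt a b := by
  intro is
  induction is with
  | nil =>
    intro Mt hShp _
    refine ⟨hShp, fun a b ha hb => ?_⟩
    rw [if_neg (by simp)]
    rfl
  | cons i is ih =>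
    intro Mt hShp his
    obtain ⟨hi1, hi2⟩ := his i (List.mem_cons_self)
    obtain ⟨hShp1, hent1⟩ := jfold seq1 seq2 str st N M i hst hi1 hi2
      (PySem.List.pyRange st ((M:Int) - st) 1) Mt hShp
      (fun x hx => (PySem.List.mem_pyRange_one).mp hx)
    rw [List.foldl_cons]
    obtain ⟨hShpR, hentR⟩ := ih _ hShp1 (fun x hx => his x (List.mem_cons_of_mem _ hx))
    refine ⟨hShpR, fun a b ha hb => ?_⟩
    rw [hentR a b ha hb, hent1 a b ha hb]
    by_cases hB : st ≤ (b:Int) ∧ (b:Int) < (M:Int) - st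
    · by_cases hC : str ≤ dSum seq1 seq2 ((b:Int) - (a:Int)) ((a:Int) - st) ((a:Int) + st + 1)
      · by_cases h1 : (a:Int) ∈ is
        · rw [if_pos ⟨h1, hB.1, hB.2, hC⟩, if_pos ⟨List.mem_cons_of_mem _ h1, hB.1, hB.2, hC⟩]
        · rw [if_neg (fun h => h1 h.1)]
          by_cases h2 : (a:Int) = i
          · rw [if_pos ⟨h2, PySem.List.mem_pyRange_one.mpr hB, by rw [h2] at hC; exact hC⟩,
                if_pos ⟨by rw [h2]; exact List.mem_cons_self, hB.1, hB.2, hC⟩]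
          · rw [if_neg (fun h => h2 h.1),
                if_neg (fun h => ((List.mem_cons.mp h.1).elim h2 h1))]
      · rw [if_neg (fun h => hC h.2.2.2),
            if_neg (fun h => hC (by rw [h.1]; exact h.2.2)),
            if_neg (fun h => hC h.2.2.2)]
    · rw [if_neg (fun h => hB ⟨h.2.1, h.2.2.1⟩),
          if_neg (fun h => hB (PySem.List.mem_pyRange_one.mp h.2.1)),
          if_neg (fun h => hB ⟨h.2.1, h.2.2.1⟩)]

lemma inner_row (Mn : Nat) : ∀ (pre : List (List Int)) (r : List Int),
    (PySem.List.pyRange 0 (Mn:Int) 1).foldl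
      (fun mat _j => PySem.List.pySetD mat ((pre.length:Nat):Int)
        ((PySem.List.pyGetD mat ((pre.length:Nat):Int) []) ++ [0]))
      (pre ++ [r]) = pre ++ [r ++ List.replicate Mn 0] := by
  induction Mn with
  | zero =>
    intro pre r
    rw [PySem.List.pyRange_one_eq_nil (by norm_num)]
    simp
  | succ Mn ih =>
    intro pre r
    rw [show ((Mn+1:Nat):Int) = ((Mn:Nat):Int) + 1 from by push_cast; ring,
        PySem.List.pyRange_one_succ_right (by positivity), List.foldl_concat, ih pre r]
    have e1 : PySem.List.pyGetD (pre ++ [r ++ List.replicate Mn 0]) ((pre.length:Nat):Int) []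
        = r ++ List.replicate Mn 0 := by
      rw [PySem.List.pyGetD_natCast]
      rw [List.getD_eq_getElem _ _ (by simp)]
      exact List.getElem_concat_length rfl _
    rw [e1, PySem.List.pySetD_natCast]
    rw [List.set_append_right _ _ le_rfl]
    simp [List.replicate_succ']

lemma create_mat_eq (N Mn : Nat) :
    create_mat ((N:Nat):Int) ((Mn:Nat):Int) = List.replicate N (List.replicate Mn 0) := by
  induction N with
  | zero =>
    rfl
  | succ N ih =>
    unfold create_mat at ih ⊢
    rw [show ((N+1:Nat):Int) = ((N:Nat):Int) + 1 from by push_cast; ring,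
        PySem.List.pyRange_one_succ_right (by positivity), List.foldl_concat, ih]
    have := inner_row Mn (List.replicate N (List.replicate Mn 0)) []
    simp only [List.length_replicate] at this
    simp only []
    rw [this]
    rw [List.nil_append, ← List.replicate_succ']

def cellSpec (s1 s2 : String) (st str n m : Int) (i j : Int) : Int :=
  if 0 ≤ st ∧ st ≤ i ∧ i < n - st ∧ st ≤ j ∧ j < m - st ∧
     str ≤ dSum s1 s2 (j - i) (i - st) (i + st + 1)
  then 1 else 0

def grid (n m : Int) (f : Int → Int → Int) : List (List Int) :=
  (PySem.List.pyRange 0 n 1).map (fun i => (PySem.List.pyRange 0 m 1).map (fun j => f i j))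

lemma Shp_replicate (N M : Nat) : Shp N M (List.replicate N (List.replicate M (0:Int))) := by
  refine ⟨by simp, fun r hr => ?_⟩
  rw [List.eq_of_mem_replicate hr]
  simp

lemma ent_replicate (N M : Nat) (a b : Nat) :
    ent (List.replicate N (List.replicate M (0:Int))) a b = 0 := by
  unfold ent
  simp [List.getD, List.getElem?_replicate]
  split <;> simp

lemma grid_zero (N M : Nat) (f : Int → Int → Int)
    (hf : ∀ i j, 0 ≤ i → i < (N:Int) → 0 ≤ j → j < (M:Int) → f i j = 0) :
    grid (N:Int) (M:Int) f = List.replicate N (List.replicate M 0) := by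
  unfold grid
  rw [List.map_congr_left (g := fun _ => List.replicate M (0:Int)) ?_]
  · rw [List.map_const', PySem.List.length_pyRange_one]
    norm_num
  · intro i hi
    obtain ⟨hi0, hiN⟩ := PySem.List.mem_pyRange_one.mp hi
    rw [List.map_congr_left (g := fun _ => (0:Int)) ?_]
    · rw [List.map_const', PySem.List.length_pyRange_one]
      norm_num
    · intro j hj
      obtain ⟨hj0, hjM⟩ := PySem.List.mem_pyRange_one.mp hj
      exact hf i j hi0 (by omega) hj0 (by omega)

lemma A_eq_grid (seq1 seq2 : String) (window str : Int) :
    extended_dotplot seq1 seq2 window str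
    = grid (PySem.Str.len seq1) (PySem.Str.len seq2)
        (cellSpec seq1 seq2 (PySem.Int.truncdiv window 2) str (PySem.Str.len seq1) (PySem.Str.len seq2)) := by
  have hn : PySem.Str.len seq1 = ((seq1.toList.length : Nat) : Int) := PySem.Str.len_eq seq1
  have hm : PySem.Str.len seq2 = ((seq2.toList.length : Nat) : Int) := PySem.Str.len_eq seq2
  set st : Int := PySem.Int.truncdiv window 2 with hst_def
  set N : Nat := seq1.toList.length with hN
  set M : Nat := seq2.toList.length with hM
  have hA : extended_dotplot seq1 seq2 window str
      = (PySem.List.pyRange st ((N:Int) - st) 1).foldl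
          (fun mat i => (PySem.List.pyRange st ((M:Int) - st) 1).foldl (stepJA seq1 seq2 str st i) mat)
          (create_mat (N:Int) (M:Int)) := by
    unfold extended_dotplot stepJA
    rw [hn, hm]
  rw [hA, hn, hm, create_mat_eq]
  by_cases hst : 0 ≤ st
  · obtain ⟨hShpR, hentR⟩ := ifold seq1 seq2 str st N M hst
      (PySem.List.pyRange st ((N:Int) - st) 1)
      (List.replicate N (List.replicate M 0)) (Shp_replicate N M)
      (fun x hx => PySem.List.mem_pyRange_one.mp hx)
    apply List.ext_getElem
    · rw [hShpR.1]
      unfold grid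
      rw [List.length_map, PySem.List.length_pyRange_one]
      omega
    intro a h1 h2
    apply List.ext_getElem
    · have hmem := List.getElem_mem h1
      rw [hShpR.2 _ hmem]
      unfold grid
      rw [List.getElem_map, List.length_map, PySem.List.length_pyRange_one]
      omega
    intro b hb1 hb2
    have haN : a < N := by rw [← hShpR.1]; exact h1
    have hbM : b < M := by
      have hmem := List.getElem_mem h1
      rw [← hShpR.2 _ hmem]; exact hb1
    have eL : (List.foldl (fun mat i => (PySem.List.pyRange st ((M:Int) - st) 1).foldl (stepJA seq1 seq2 str st i) mat)
          (List.replicate N (List.replicate M 0)) (PySem.List.pyRange st ((N:Int) - st) 1))[a][b]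
        = ent (List.foldl (fun mat i => (PySem.List.pyRange st ((M:Int) - st) 1).foldl (stepJA seq1 seq2 str st i) mat)
          (List.replicate N (List.replicate M 0)) (PySem.List.pyRange st ((N:Int) - st) 1)) a b := by
      unfold ent
      rw [List.getD_eq_getElem _ _ h1, List.getD_eq_getElem _ _ hb1]
    rw [eL, hentR a b haN hbM, ent_replicate]
    simp only [grid, List.getElem_map, PySem.List.getElem_pyRange_one, zero_add]
    unfold cellSpec
    by_cases hcond : (a:Int) ∈ PySem.List.pyRange st ((N:Int) - st) 1 ∧ st ≤ (b:Int) ∧ (b:Int) < (M:Int) - st ∧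
        str ≤ dSum seq1 seq2 ((b:Int) - (a:Int)) ((a:Int) - st) ((a:Int) + st + 1)
    · obtain ⟨hc1, hc2, hc3, hc4⟩ := hcond
      obtain ⟨hd1, hd2⟩ := PySem.List.mem_pyRange_one.mp hc1
      rw [if_pos ⟨hc1, hc2, hc3, hc4⟩, if_pos ⟨hst, hd1, hd2, hc2, hc3, hc4⟩]
    · rw [if_neg hcond, if_neg (fun h => hcond ⟨PySem.List.mem_pyRange_one.mpr ⟨h.2.1, h.2.2.1⟩, h.2.2.2⟩)]
  · have hstep0 : ∀ i mat j, stepJA seq1 seq2 str st i mat j = mat := by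
      intro i mat j
      unfold stepJA
      rw [PySem.List.pyRange_one_eq_nil (by omega)]
      rfl
    have h1 : ∀ (mat : List (List Int)) (i : Int),
        (PySem.List.pyRange st ((M:Int) - st) 1).foldl (stepJA seq1 seq2 str st i) mat = mat := by
      intro mat i
      rw [PySem.List.foldl_congr_mem _ _ (fun m _ => m) mat (fun acc x _ => hstep0 i acc x)]
      exact List.foldl_fixed _
    rw [PySem.List.foldl_congr_mem _ _ (fun m _ => m) _ (fun acc x _ => h1 acc x),
        List.foldl_fixed]
    rw [grid_zero N M _ (fun i j _ _ _ _ => by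
      unfold cellSpec
      rw [if_neg (fun h => hst h.1)])]

lemma prefFold (seq1 seq2 : String) (i0 d : Int) (Lt : Nat) : ∀ (c : Int) (acc : List Int),
    (PySem.List.pyRange 0 (Lt:Int) 1).foldl
      (fun (s : Int × List Int) t =>
        (s.1 + (if PySem.Str.pyGet? seq1 (i0 + t) == PySem.Str.pyGet? seq2 ((i0 + d) + t) then (1:Int) else 0),
         s.2 ++ [s.1 + (if PySem.Str.pyGet? seq1 (i0 + t) == PySem.Str.pyGet? seq2 ((i0 + d) + t) then (1:Int) else 0)]))
      (c, acc)
    = (c + dSum seq1 seq2 d i0 (i0 + (Lt:Int)),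
       acc ++ (PySem.List.pyRange 1 ((Lt:Int) + 1) 1).map (fun x => c + dSum seq1 seq2 d i0 (i0 + x))) := by
  induction Lt with
  | zero =>
    intro c acc
    rw [PySem.List.pyRange_one_eq_nil (by norm_num)]
    rw [PySem.List.pyRange_one_eq_nil (by norm_num)]
    rw [dSum_empty seq1 seq2 d i0 (i0 + ((0:Nat):Int)) (by norm_num)]
    simp
  | succ Lt ih =>
    intro c acc
    rw [show ((Lt+1:Nat):Int) = ((Lt:Nat):Int) + 1 from by push_cast; ring]
    rw [PySem.List.pyRange_one_succ_right (by positivity), List.foldl_concat, ih c acc]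
    have hmatch : (if PySem.Str.pyGet? seq1 (i0 + (Lt:Int)) == PySem.Str.pyGet? seq2 ((i0 + d) + (Lt:Int)) then (1:Int) else 0)
        = (if mEq seq1 seq2 (i0 + (Lt:Int)) ((i0 + (Lt:Int)) + d) then (1:Int) else 0) := by
      unfold mEq
      rw [show (i0 + (Lt:Int)) + d = (i0 + d) + (Lt:Int) from by ring]
    have hd1 : dSum seq1 seq2 d i0 (i0 + (Lt:Int) + 1)
        = dSum seq1 seq2 d i0 (i0 + (Lt:Int)) + (if mEq seq1 seq2 (i0 + (Lt:Int)) ((i0 + (Lt:Int)) + d) then (1:Int) else 0) :=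
      dSum_succ_right seq1 seq2 d i0 (i0 + (Lt:Int)) (by omega)
    refine Prod.ext ?_ ?_
    · simp only []
      rw [hmatch, show i0 + ((Lt:Int) + 1) = i0 + (Lt:Int) + 1 from by ring, hd1]
      ring
    · simp only []
      rw [PySem.List.pyRange_one_succ_right (a := 1) (b := (Lt:Int) + 1) (by omega),
          List.map_append, hmatch, List.append_assoc]
      congr 1
      simp only [List.map_cons, List.map_nil]
      congr 1
      rw [show i0 + ((Lt:Int) + 1) = i0 + (Lt:Int) + 1 from by ring, hd1]
      rw [add_assoc]

lemma B_eq_grid (seq1 seq2 : String) (window str : Int) :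
    extended_dotplot_alt seq1 seq2 window str
    = grid (PySem.Str.len seq1) (PySem.Str.len seq2)
        (cellSpec seq1 seq2 (PySem.Int.truncdiv window 2) str (PySem.Str.len seq1) (PySem.Str.len seq2)) := by
  have hn : PySem.Str.len seq1 = ((seq1.toList.length : Nat) : Int) := PySem.Str.len_eq seq1
  have hm : PySem.Str.len seq2 = ((seq2.toList.length : Nat) : Int) := PySem.Str.len_eq seq2
  set st : Int := PySem.Int.truncdiv window 2 with hst_def
  set N : Nat := seq1.toList.length with hN
  set M : Nat := seq2.toList.length with hM
  have hB : extended_dotplot_alt seq1 seq2 window str =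
      (if st < 0 then
        (PySem.List.pyRange 0 ((N:Nat):Int) 1).map (fun _ =>
          (PySem.List.pyRange 0 ((M:Nat):Int) 1).map (fun _ => (0:Int)))
      else
        (PySem.List.pyRange 0 ((N:Nat):Int) 1).map (fun i =>
          (PySem.List.pyRange 0 ((M:Nat):Int) 1).map (fun j =>
            if i < st ∨ i ≥ ((N:Nat):Int) - st ∨ j < st ∨ j ≥ ((M:Nat):Int) - st then (0:Int)
            else
              if PySem.List.pyGetD
                   (PySem.List.pyGetD
                     ((PySem.List.pyRange (-(((N:Nat):Int) - 1)) ((M:Nat):Int) 1).foldl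
                       (fun P d => P ++ [(List.foldl
                         (fun (s : Int × List Int) t =>
                           (s.1 + (if PySem.Str.pyGet? seq1 ((if d ≥ 0 then 0 else -d) + t) ==
                                      PySem.Str.pyGet? seq2 (((if d ≥ 0 then 0 else -d) + d) + t)
                                   then (1:Int) else 0),
                            s.2 ++ [s.1 + (if PySem.Str.pyGet? seq1 ((if d ≥ 0 then 0 else -d) + t) ==
                                      PySem.Str.pyGet? seq2 (((if d ≥ 0 then 0 else -d) + d) + t)
                                   then (1:Int) else 0)]))
                         ((0:Int), [(0:Int)])
                         (PySem.List.pyRange 0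
                           (min (((N:Nat):Int) - (if d ≥ 0 then 0 else -d))
                                (((M:Nat):Int) - ((if d ≥ 0 then 0 else -d) + d))) 1)).2]) [])
                     (j - i + ((N:Nat):Int) - 1) [])
                   (i - (if j - i ≥ 0 then 0 else -(j - i)) + st + 1) 0
                 - PySem.List.pyGetD
                   (PySem.List.pyGetD
                     ((PySem.List.pyRange (-(((N:Nat):Int) - 1)) ((M:Nat):Int) 1).foldl
                       (fun P d => P ++ [(List.foldl
                         (fun (s : Int × List Int) t =>
                           (s.1 + (if PySem.Str.pyGet? seq1 ((if d ≥ 0 then 0 else -d) + t) ==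
                                      PySem.Str.pyGet? seq2 (((if d ≥ 0 then 0 else -d) + d) + t)
                                   then (1:Int) else 0),
                            s.2 ++ [s.1 + (if PySem.Str.pyGet? seq1 ((if d ≥ 0 then 0 else -d) + t) ==
                                      PySem.Str.pyGet? seq2 (((if d ≥ 0 then 0 else -d) + d) + t)
                                   then (1:Int) else 0)]))
                         ((0:Int), [(0:Int)])
                         (PySem.List.pyRange 0
                           (min (((N:Nat):Int) - (if d ≥ 0 then 0 else -d))
                                (((M:Nat):Int) - ((if d ≥ 0 then 0 else -d) + d))) 1)).2]) [])
                     (j - i + ((N:Nat):Int) - 1) [])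
                   (i - (if j - i ≥ 0 then 0 else -(j - i)) - st) 0
                 ≥ str
              then (1:Int) else 0))) := by
    unfold extended_dotplot_alt
    rw [hn, hm]
  rw [hB, hn, hm]
  by_cases hst : 0 ≤ st
  · rw [if_neg (by omega)]
    unfold grid
    apply List.map_congr_left
    intro i hi
    obtain ⟨hi0, hiN⟩ := PySem.List.mem_pyRange_one.mp hi
    apply List.map_congr_left
    intro j hj
    obtain ⟨hj0, hjM⟩ := PySem.List.mem_pyRange_one.mp hj
    by_cases hint : i < st ∨ i ≥ ((N:Nat):Int) - st ∨ j < st ∨ j ≥ ((M:Nat):Int) - st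
    · rw [if_pos hint]
      unfold cellSpec
      rw [if_neg (by omega)]
    · rw [if_neg hint]
      have h1 : st ≤ i := by omega
      have h2 : i < ((N:Nat):Int) - st := by omega
      have h3 : st ≤ j := by omega
      have h4 : j < ((M:Nat):Int) - st := by omega
      rw [PySem.List.foldl_append_singleton_eq_map, List.nil_append]
      rw [show j - i + ((N:Nat):Int) - 1 = (j - i) - (-(((N:Nat):Int) - 1)) from by ring]
      rw [pyGetD_map_pyRange_mem _ _ _ _ _ (by omega) (by omega)]
      set I0 : Int := if j - i ≥ 0 then 0 else -(j - i) with hI0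
      have hI0f : 0 ≤ I0 ∧ I0 ≤ i ∧ st ≤ i - I0 ∧ I0 + (j - i) ≤ j ∧ 0 ≤ I0 + (j - i) := by
        rw [hI0]; split <;> omega
      set L : Int := min (((N:Nat):Int) - I0) (((M:Nat):Int) - (I0 + (j - i))) with hL
      have hLb : i - I0 + st + 1 ≤ L := by omega
      have hLpos : 0 ≤ L := by omega
      rw [show L = ((L.toNat : Nat) : Int) from by omega]
      rw [prefFold seq1 seq2 I0 (j - i) L.toNat 0 [0]]
      simp only [zero_add]
      rw [show ([(0:Int)] ++ List.map (fun x => dSum seq1 seq2 (j - i) I0 (I0 + x))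
            (PySem.List.pyRange 1 ((L.toNat:Int) + 1) 1))
          = List.map (fun x => dSum seq1 seq2 (j - i) I0 (I0 + x))
            (PySem.List.pyRange 0 ((L.toNat:Int) + 1) 1) from by
        rw [PySem.List.pyRange_one_cons (a := 0) (b := ((L.toNat:Nat):Int) + 1) (by omega), List.map_cons, List.singleton_append]
        congr 1
        rw [add_zero]
        exact (dSum_empty seq1 seq2 (j - i) I0 I0 le_rfl).symm]
      rw [show i - I0 + st + 1 = (i - I0 + st + 1) - 0 from by ring]
      rw [pyGetD_map_pyRange_mem _ _ _ _ _ (by omega) (by omega)]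
      rw [show i - I0 - st = (i - I0 - st) - 0 from by ring]
      rw [pyGetD_map_pyRange_mem _ _ _ _ _ (by omega) (by omega)]
      rw [show I0 + (i - I0 + st + 1) = i + st + 1 from by ring,
          show I0 + (i - I0 - st) = i - st from by ring]
      rw [dSum_split seq1 seq2 (j - i) I0 (i - st) (i + st + 1) (by omega) (by omega),
          add_sub_cancel_left]
      unfold cellSpec
      simp only [ge_iff_le]
      exact if_congr (Iff.intro (fun h => ⟨hst, h1, h2, h3, h4, h⟩) (fun h => h.2.2.2.2.2)) rfl rfl
  · rw [if_pos (by omega)]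
    rw [grid_zero N M _ (fun i j _ _ _ _ => by
      unfold cellSpec
      rw [if_neg (fun h => hst h.1)])]
    rw [List.map_congr_left (g := fun _ => List.replicate M (0:Int)) (fun x _ => by
      rw [List.map_const', PySem.List.length_pyRange_one]
      norm_num)]
    rw [List.map_const', PySem.List.length_pyRange_one]
    norm_num

-- ===== VERDICT (by name: the statement is the Claim_ definition above) =====
theorem extended_dotplot_spec : Claim_equal_extended_dotplot := by
  intro seq1 seq2 window stringency _
  unfold Spec_extended_dotplot
  exact (A_eq_grid seq1 seq2 window stringency).trans (B_eq_grid seq1 seq2 window stringency).symm
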